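-- pv_equiv track=rewrite | github.com/nichiang/kids-chatbot | backend/prompt_manager.py | _parse_template_file
-- ===== SOURCE A (Python) =====
-- from typing import Dict, List, Optional, Tuple
--
-- def _parse_template_file(content: str) -> Dict[str, str]:
--     """Parse template file with KEY: format into dictionary"""
--     templates = {}
--     current_key = None
--     current_content = []
--
--     for line in content.split('\n'):
--         if line.endswith(':') and line.count(':') == 1:
--             # Save previous template
--             if current_key:
--                 templates[current_key] = '\n'.join(current_content).strip()
--             # Start new template
--             current_key = line[:-1]  # Remove colon
--             current_content = []
--         elif current_key:
--             current_content.append(line)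
--
--     # Save last template
--     if current_key:
--         templates[current_key] = '\n'.join(current_content).strip()
--
--     return templates
-- ===== SOURCE B (Python) =====
-- def _parse_template_file(content: str):
--     """Parse template file with KEY: format into dictionary (two-pass: sections, then dict)."""
--     sections = []  # list of (key, body_lines)
--     for line in content.split('\n'):
--         if line.endswith(':') and line.count(':') == 1:
--             sections.append((line[:-1], []))
--         elif sections:
--             sections[-1][1].append(line)
--     templates = {}
--     for key, body in sections:
--         if key:
--             templates[key] = '\n'.join(body).strip()
--     return templates
-- ===== Notes on version B (the rewrite author's own statement) =====
-- stated objective: alternative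
-- what changed: Replaced A's single stateful loop (current_key/current_content with mid-loop and post-loop dict saves) by a two-pass decomposition: first pass groups the lines into (key, body-lines) sections, second pass joins/strips each truthy-keyed section into the dict.
import Mathlib
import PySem

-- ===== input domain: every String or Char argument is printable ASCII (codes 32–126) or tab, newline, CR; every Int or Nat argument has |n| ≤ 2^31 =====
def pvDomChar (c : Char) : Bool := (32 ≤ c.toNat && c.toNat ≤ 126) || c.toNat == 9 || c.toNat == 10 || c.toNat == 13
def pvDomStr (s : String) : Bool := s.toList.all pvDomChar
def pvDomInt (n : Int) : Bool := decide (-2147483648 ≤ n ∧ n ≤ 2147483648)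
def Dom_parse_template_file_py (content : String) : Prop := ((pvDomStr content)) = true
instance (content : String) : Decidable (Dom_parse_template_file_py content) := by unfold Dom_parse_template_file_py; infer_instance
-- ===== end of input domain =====

-- B parses in two passes — first collect (key, body-lines) sections, then build the dict — instead of A's
-- single loop with current_key/current_content state; objective: alternative decomposition (same cost).


-- shared by both ports (the identical Python expressions appear in Source A and Source B)
-- line.endswith(':') and line.count(':') == 1
def pvIsHeader (line : String) : Bool :=
  PySem.Str.endswith line ":" && (PySem.Str.count line ":" == 1)

-- line[:-1]
def pvKeyOf (line : String) : String := PySem.Str.slice line none (some (-1))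

-- content.split('\n'); the separator is the literal '\n' ≠ '', so split? is always some
def pvSplitLines (content : String) : List String :=
  (PySem.Str.split? content "\n").getD []

-- ===== PORT A =====
-- Python truthiness of current_key (None or a str)
def pvTruthy : Option String → Bool
  | none => false
  | some k => !(k == "")

-- 'if current_key: templates[current_key] = "\n".join(current_content).strip()' (appears twice in A)
def pvSaveA (templates : PySem.Dict String String) (ck : Option String) (cc : List String) :
    PySem.Dict String String :=
  if pvTruthy ck then
    templates.insert (ck.getD "") (PySem.Str.strip (PySem.Str.join "\n" cc))
  else templates

-- the body of A's for-loop
def pvStepA (st : PySem.Dict String String × Option String × List String) (line : String) :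
    PySem.Dict String String × Option String × List String :=
  if pvIsHeader line then (pvSaveA st.1 st.2.1 st.2.2, some (pvKeyOf line), [])
  else if pvTruthy st.2.1 then (st.1, st.2.1, st.2.2 ++ [line])
  else st

def parse_template_file_py (content : String) : List (String × String) :=
  let st := (pvSplitLines content).foldl pvStepA (PySem.Dict.empty, none, [])
  (pvSaveA st.1 st.2.1 st.2.2).items

-- ===== PORT B =====
-- sections[-1][1].append(line)  (only reached when sections is nonempty)
def pvAppendLast : List (String × List String) → String → List (String × List String)
  | [], _ => []
  | [(k, b)], line => [(k, b ++ [line])]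
  | x :: y :: rest, line => x :: pvAppendLast (y :: rest) line

-- the body of B's first for-loop
def pvStepB (ss : List (String × List String)) (line : String) : List (String × List String) :=
  if pvIsHeader line then ss ++ [(pvKeyOf line, [])]
  else if !ss.isEmpty then pvAppendLast ss line
  else ss

-- the body of B's second for-loop
def pvStep2 (templates : PySem.Dict String String) (kb : String × List String) :
    PySem.Dict String String :=
  if !(kb.1 == "") then templates.insert kb.1 (PySem.Str.strip (PySem.Str.join "\n" kb.2))
  else templates

def parse_template_file_py_alt (content : String) : List (String × String) :=
  let sections := (pvSplitLines content).foldl pvStepB []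
  (sections.foldl pvStep2 PySem.Dict.empty).items

-- ===== PRECONDITION & SPEC =====
def Spec_parse_template_file_py (content : String) (out : List (String × String)) : Prop := out = parse_template_file_py_alt content
instance (content : String) (out : List (String × String)) : Decidable (Spec_parse_template_file_py content out) := by unfold Spec_parse_template_file_py; infer_instance

-- ===== CLAIM (what is proved, stated in full; the proofs are below) =====
def Claim_equal_parse_template_file_py : Prop := ∀ (content : String), Dom_parse_template_file_py content → Spec_parse_template_file_py content (parse_template_file_py content)

-- ===== LEMMAS AND PROOFS =====

-- the invariant relating A's running state (d, ck, cc) to B's section list ss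
def pvInv (d : PySem.Dict String String) (ck : Option String) (cc : List String)
    (ss : List (String × List String)) : Prop :=
  (ck = none ∧ ss = [] ∧ d = PySem.Dict.empty) ∨
  (∃ k init cc', ck = some k ∧ ss = init ++ [(k, cc')] ∧
    d = init.foldl pvStep2 PySem.Dict.empty ∧ (k ≠ "" → cc' = cc))

lemma pvAppendLast_append (init : List (String × List String)) (k : String) (b : List String)
    (line : String) : pvAppendLast (init ++ [(k, b)]) line = init ++ [(k, b ++ [line])] := by
  induction init with
  | nil => rfl
  | cons x t ih =>
    cases t with
    | nil => rfl
    | cons y r => simpa [pvAppendLast] using ih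

lemma pvSave_eq (d : PySem.Dict String String) (ck : Option String) (cc : List String)
    (ss : List (String × List String)) (h : pvInv d ck cc ss) :
    pvSaveA d ck cc = ss.foldl pvStep2 PySem.Dict.empty := by
  rcases h with ⟨hck, hss, hd⟩ | ⟨k, init, cc', hck, hss, hd, hcc⟩
  · subst hck hss hd; rfl
  · subst hck hss hd
    rw [List.foldl_append]
    by_cases hk : k = ""
    · subst hk; simp [pvSaveA, pvTruthy, pvStep2, List.foldl]
    · simp [pvSaveA, pvTruthy, pvStep2, List.foldl, hk, hcc hk]

lemma pvMain (rest : List String) : ∀ (d : PySem.Dict String String) (ck : Option String)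
    (cc : List String) (ss : List (String × List String)), pvInv d ck cc ss →
    (let st := rest.foldl pvStepA (d, ck, cc); pvSaveA st.1 st.2.1 st.2.2)
      = (rest.foldl pvStepB ss).foldl pvStep2 PySem.Dict.empty := by
  induction rest with
  | nil => intro d ck cc ss h; exact pvSave_eq d ck cc ss h
  | cons l r ih =>
    intro d ck cc ss h
    by_cases hH : pvIsHeader l = true
    · have hA : pvStepA (d, ck, cc) l = (pvSaveA d ck cc, some (pvKeyOf l), []) := by
        simp [pvStepA, hH]
      have hB : pvStepB ss l = ss ++ [(pvKeyOf l, [])] := by simp [pvStepB, hH]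
      simp only [List.foldl_cons, hA, hB]
      exact ih _ _ _ _ (Or.inr ⟨pvKeyOf l, ss, [], rfl, rfl,
        pvSave_eq d ck cc ss h, fun _ => rfl⟩)
    · rcases h with ⟨hck, hss, hd⟩ | ⟨k, init, cc', hck, hss, hd, hcc⟩
      · subst hck hss
        have hA : pvStepA (d, none, cc) l = (d, none, cc) := by
          simp [pvStepA, hH, pvTruthy]
        have hB : pvStepB [] l = ([] : List (String × List String)) := by
          simp [pvStepB, hH]
        simp only [List.foldl_cons, hA, hB]
        exact ih _ _ _ _ (Or.inl ⟨rfl, rfl, hd⟩)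
      · subst hck hss
        have hB : pvStepB (init ++ [(k, cc')]) l = init ++ [(k, cc' ++ [l])] := by
          simp [pvStepB, hH, pvAppendLast_append]
        by_cases hk : k = ""
        · subst hk
          have hA : pvStepA (d, some "", cc) l = (d, some "", cc) := by
            simp [pvStepA, hH, pvTruthy]
          simp only [List.foldl_cons, hA, hB]
          exact ih _ _ _ _ (Or.inr ⟨"", init, cc' ++ [l], rfl, rfl, hd, fun hx => absurd rfl hx⟩)
        · have hA : pvStepA (d, some k, cc) l = (d, some k, cc ++ [l]) := by
            simp [pvStepA, hH, pvTruthy, hk]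
          simp only [List.foldl_cons, hA, hB]
          exact ih _ _ _ _ (Or.inr ⟨k, init, cc' ++ [l], rfl, rfl, hd,
            fun hx => by rw [hcc hx]⟩)

-- ===== VERDICT (by name: the statement is the Claim_ definition above) =====
theorem parse_template_file_py_spec : Claim_equal_parse_template_file_py := by
  intro content _
  show parse_template_file_py content = parse_template_file_py_alt content
  unfold parse_template_file_py parse_template_file_py_alt
  exact congrArg PySem.Dict.items
    (pvMain (pvSplitLines content) PySem.Dict.empty none [] [] (Or.inl ⟨rfl, rfl, rfl⟩))
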